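-- pv_equiv track=rewrite | github.com/zjgpf/Practice | find_busiest_period.py | find_busiest_period
-- ===== SOURCE A (Python) =====
-- def find_busiest_period(data):
--   maxTimeStamp = data[0][0]
--   sumPeople = 0
--   maxPeople = 0
--   length = len(data)
--
--   for i in range(0, len(data)-1):
--     if data[i][2] == 0:
--       sumPeople = sumPeople - data[i][1]
--     elif data[i][2] == 1:
--       sumPeople = sumPeople + data[i][1]
--     if maxPeople < sumPeople and (i == length -1 or data[i][0] != data[i+1][0]):
--       maxPeople = sumPeople
--       maxTimeStamp = data[i][0]
--   if data[len(data)-1][2] == 0: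
--     sumPeople = sumPeople - data[len(data)-1][1]
--   elif data[len(data)-1][2] ==1:
--     sumPeople = sumPeople + data[len(data)-1][1]
--   if maxPeople < sumPeople:
--     maxTimeStamp = data[len(data)-1][0]
--
--
--   return maxTimeStamp
-- ===== SOURCE B (Python) =====
-- def find_busiest_period(data):
--   n = len(data)
--   sums = []
--   total = 0
--   for e in data:
--     if e[2] == 0:
--       total -= e[1]
--     elif e[2] == 1:
--       total += e[1]
--     sums.append(total)
--   best = 0
--   bestTs = data[0][0]
--   for i in range(n):
--     if (i == n - 1 or data[i][0] != data[i + 1][0]) and best < sums[i]: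
--       best = sums[i]
--       bestTs = data[i][0]
--   return bestTs
-- ===== Notes on version B (the rewrite author's own statement) =====
-- stated objective: alternative
-- what changed: A's single loop that mutates running sum and best-so-far together (with a duplicated copy of the body for the last element) is replaced by two passes: one building a prefix-sum list of concurrent counts, then a uniform boundary-selection scan over indices that also covers the last element.
import Mathlib
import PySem

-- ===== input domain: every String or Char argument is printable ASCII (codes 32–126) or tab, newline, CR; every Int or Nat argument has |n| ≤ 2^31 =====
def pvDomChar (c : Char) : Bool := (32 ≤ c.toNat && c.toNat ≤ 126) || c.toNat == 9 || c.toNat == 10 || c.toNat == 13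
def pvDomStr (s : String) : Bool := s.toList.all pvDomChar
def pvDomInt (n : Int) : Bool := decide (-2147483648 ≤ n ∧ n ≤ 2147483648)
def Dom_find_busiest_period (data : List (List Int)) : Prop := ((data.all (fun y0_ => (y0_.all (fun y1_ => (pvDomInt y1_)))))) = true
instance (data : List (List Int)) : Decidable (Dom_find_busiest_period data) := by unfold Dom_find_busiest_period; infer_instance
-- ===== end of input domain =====

-- B replaces A's single mutating loop (duplicated tail block included) by two passes: a prefix-sum
-- pass over the rows, then a uniform boundary-selection pass over indices; same return value.


-- data[i][j] for nonnegative in-range indices (the defaults are only reached outside Pre_)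
def pvAt (data : List (List Int)) (i j : Int) : Int :=
  PySem.List.pyGetD (PySem.List.pyGetD data i []) j 0

-- ===== PORT A =====
def find_busiest_period (data : List (List Int)) : Int :=
  let length : Int := data.length
  let st := (PySem.List.pyRange 0 ((data.length : Int) - 1)).foldl
    (fun (st : Int × Int × Int) (i : Int) =>
      let sp := if pvAt data i 2 = 0 then st.2.1 - pvAt data i 1
                else if pvAt data i 2 = 1 then st.2.1 + pvAt data i 1 else st.2.1
      if st.2.2 < sp ∧ (i = length - 1 ∨ pvAt data i 0 ≠ pvAt data (i + 1) 0)
      then (pvAt data i 0, sp, sp) else (st.1, sp, st.2.2))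
    (pvAt data 0 0, 0, 0)
  let last : Int := (data.length : Int) - 1
  let sp := if pvAt data last 2 = 0 then st.2.1 - pvAt data last 1
            else if pvAt data last 2 = 1 then st.2.1 + pvAt data last 1 else st.2.1
  if st.2.2 < sp then pvAt data last 0 else st.1

-- B-side helper: data[i][j]
def pvAtB (data : List (List Int)) (i j : Int) : Int :=
  PySem.List.pyGetD (PySem.List.pyGetD data i []) j 0

-- ===== PORT B =====
def find_busiest_period_alt (data : List (List Int)) : Int :=
  let n : Int := data.length
  let acc := data.foldl (fun (p : Int × List Int) e =>
      let t := if PySem.List.pyGetD e 2 0 = 0 then p.1 - PySem.List.pyGetD e 1 0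
               else if PySem.List.pyGetD e 2 0 = 1 then p.1 + PySem.List.pyGetD e 1 0 else p.1
      (t, p.2 ++ [t])) (0, [])
  let sums := acc.2
  let st := (PySem.List.pyRange 0 n).foldl
    (fun (st : Int × Int) (i : Int) =>
      if ((i = n - 1 ∨ pvAtB data i 0 ≠ pvAtB data (i + 1) 0) ∧ st.1 < PySem.List.pyGetD sums i 0)
      then (PySem.List.pyGetD sums i 0, pvAtB data i 0) else st)
    (0, pvAtB data 0 0)
  st.2

-- ===== PRECONDITION & SPEC =====
-- Pre_ excludes exactly the inputs on which A raises IndexError: empty data, or a row with fewer than 3 entries.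
def Pre_find_busiest_period (data : List (List Int)) : Prop :=
  data ≠ [] ∧ ∀ r ∈ data, 3 ≤ r.length
instance (data : List (List Int)) : Decidable (Pre_find_busiest_period data) := by
  unfold Pre_find_busiest_period; infer_instance

def pvWitness_find_busiest_period : List (List Int) := [[1, 2, 1], [1, 1, 0], [2, 3, 1]]

def Spec_find_busiest_period (data : List (List Int)) (out : Int) : Prop := out = find_busiest_period_alt data
instance (data : List (List Int)) (out : Int) : Decidable (Spec_find_busiest_period data out) := by unfold Spec_find_busiest_period; infer_instance

-- ===== CLAIM (what is proved, stated in full; the proofs are below) =====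
def Claim_equal_find_busiest_period : Prop := ∀ (data : List (List Int)), Dom_find_busiest_period data → Pre_find_busiest_period data → Spec_find_busiest_period data (find_busiest_period data)

-- ===== LEMMAS AND PROOFS =====

theorem pvAtB_eq_pvAt : pvAtB = pvAt := rfl

-- running total after processing the first m rows (B's sums[m-1], A's sumPeople after m iterations)
def pvPref (data : List (List Int)) (m : Nat) : Int :=
  (data.take m).foldl (fun t e =>
    if PySem.List.pyGetD e 2 0 = 0 then t - PySem.List.pyGetD e 1 0
    else if PySem.List.pyGetD e 2 0 = 1 then t + PySem.List.pyGetD e 1 0 else t) 0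

theorem pvAt_natCast (data : List (List Int)) (m : Nat) (j : Int) :
    pvAt data (m : Int) j = PySem.List.pyGetD (data.getD m []) j 0 := by
  simp [pvAt, PySem.List.pyGetD_natCast]

theorem pvPref_succ (data : List (List Int)) (m : Nat) (h : m < data.length) :
    pvPref data (m + 1) =
      (if pvAt data m 2 = 0 then pvPref data m - pvAt data m 1
       else if pvAt data m 2 = 1 then pvPref data m + pvAt data m 1 else pvPref data m) := by
  have ht : data.take (m+1) = data.take m ++ [data.getD m []] := by
    rw [List.take_add_one]
    congr 1
    simp [List.getElem?_eq_getElem h, List.getD, List.getElem!_eq_getElem?_getD]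
  simp [pvPref, ht, List.foldl_append, pvAt_natCast]

def pvSelA (data : List (List Int)) : Nat → Int × Int × Int
  | 0 => (pvAt data 0 0, 0, 0)
  | m + 1 =>
    let st := pvSelA data m
    let sp := if pvAt data m 2 = 0 then st.2.1 - pvAt data m 1
              else if pvAt data m 2 = 1 then st.2.1 + pvAt data m 1 else st.2.1
    if st.2.2 < sp ∧ ((m : Int) = (data.length : Int) - 1 ∨ pvAt data m 0 ≠ pvAt data (m + 1) 0)
    then (pvAt data m 0, sp, sp) else (st.1, sp, st.2.2)

theorem pvA_fold (data : List (List Int)) (m : Nat) :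
    (PySem.List.pyRange 0 (m : Int)).foldl
      (fun (st : Int × Int × Int) (i : Int) =>
        let sp := if pvAt data i 2 = 0 then st.2.1 - pvAt data i 1
                  else if pvAt data i 2 = 1 then st.2.1 + pvAt data i 1 else st.2.1
        if st.2.2 < sp ∧ (i = (data.length : Int) - 1 ∨ pvAt data i 0 ≠ pvAt data (i + 1) 0)
        then (pvAt data i 0, sp, sp) else (st.1, sp, st.2.2))
      (pvAt data 0 0, 0, 0) = pvSelA data m := by
  induction m with
  | zero => simp [pvSelA]
  | succ m ih =>
    rw [show ((m + 1 : Nat) : Int) = (m : Int) + 1 by push_cast; ring,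
      PySem.List.pyRange_one_succ_right (by positivity), List.foldl_append, ih]
    show pvSelA data (m + 1) = _
    rw [pvSelA]

theorem pvSelA_sp (data : List (List Int)) (m : Nat) (h : m ≤ data.length) :
    (pvSelA data m).2.1 = pvPref data m := by
  induction m with
  | zero => simp [pvSelA, pvPref]
  | succ m ih =>
    rw [pvSelA, pvPref_succ data m (by omega), ← ih (by omega)]
    split_ifs <;> rfl

theorem pvSums_gen (l : List (List Int)) : ∀ (t : Int) (ac : List Int),
    (l.foldl (fun (p : Int × List Int) e =>
      let t := if PySem.List.pyGetD e 2 0 = 0 then p.1 - PySem.List.pyGetD e 1 0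
               else if PySem.List.pyGetD e 2 0 = 1 then p.1 + PySem.List.pyGetD e 1 0 else p.1
      (t, p.2 ++ [t])) (t, ac)).2
    = ac ++ (List.range l.length).map (fun j => (l.take (j + 1)).foldl (fun t e =>
        if PySem.List.pyGetD e 2 0 = 0 then t - PySem.List.pyGetD e 1 0
        else if PySem.List.pyGetD e 2 0 = 1 then t + PySem.List.pyGetD e 1 0 else t) t) := by
  induction l with
  | nil => simp
  | cons e l ih =>
    intro t ac
    simp only [List.foldl_cons, ih, List.length_cons, List.range_succ_eq_map,
      List.map_cons, List.map_map]
    simp only [Function.comp_def, List.take_succ_cons, List.foldl_cons, List.take_zero,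
      List.foldl_nil, List.append_assoc, List.singleton_append]

theorem pvSums_getD (data : List (List Int)) (m : Nat) (h : m < data.length) :
    PySem.List.pyGetD ((List.range data.length).map (fun j => pvPref data (j + 1))) (m : Int) 0
      = pvPref data (m + 1) := by
  rw [PySem.List.pyGetD_natCast, PySem.List.getD_map_range _ _ _ _ h]

def pvSelB (data : List (List Int)) : Nat → Int × Int
  | 0 => (0, pvAt data 0 0)
  | m + 1 =>
    let st := pvSelB data m
    if (((m : Int) = (data.length : Int) - 1 ∨ pvAt data m 0 ≠ pvAt data (m + 1) 0) ∧ st.1 < pvPref data (m + 1))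
    then (pvPref data (m + 1), pvAt data m 0) else st

theorem pvB_fold (data : List (List Int)) (m : Nat) (h : m ≤ data.length) :
    (PySem.List.pyRange 0 (m : Int)).foldl
      (fun (st : Int × Int) (i : Int) =>
        if ((i = (data.length : Int) - 1 ∨ pvAt data i 0 ≠ pvAt data (i + 1) 0) ∧
            st.1 < PySem.List.pyGetD ((List.range data.length).map (fun j => pvPref data (j + 1))) i 0)
        then (PySem.List.pyGetD ((List.range data.length).map (fun j => pvPref data (j + 1))) i 0,
              pvAt data i 0) else st)
      (0, pvAt data 0 0) = pvSelB data m := by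
  induction m with
  | zero => simp [pvSelB]
  | succ m ih =>
    rw [show ((m + 1 : Nat) : Int) = (m : Int) + 1 by push_cast; ring,
      PySem.List.pyRange_one_succ_right (by positivity), List.foldl_append, ih (by omega)]
    show _ = pvSelB data (m + 1)
    rw [pvSelB]
    simp only [List.foldl_cons, List.foldl_nil, pvSums_getD data m (by omega)]

set_option maxHeartbeats 1000000 in
theorem pvSel_agree (data : List (List Int)) (m : Nat) (h : m ≤ data.length - 1) :
    pvSelB data m = ((pvSelA data m).2.2, (pvSelA data m).1) := by
  induction m with
  | zero => rfl
  | succ m ih =>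
    have hm : m < data.length := by omega
    have hsp : (if pvAt data m 2 = 0 then (pvSelA data m).2.1 - pvAt data m 1
                else if pvAt data m 2 = 1 then (pvSelA data m).2.1 + pvAt data m 1
                else (pvSelA data m).2.1) = pvPref data (m + 1) := by
      rw [pvSelA_sp data m (by omega), pvPref_succ data m hm]
    simp only [pvSelB, pvSelA, ih (by omega), hsp]
    split_ifs with h1 h2 h2 <;> first | rfl | (exfalso; tauto)

set_option maxHeartbeats 1000000 in
theorem pv_main (data : List (List Int)) (hne : data ≠ []) :
    find_busiest_period data = find_busiest_period_alt data := by
  obtain ⟨k, hk⟩ : ∃ k, data.length = k + 1 :=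
    ⟨data.length - 1, by have := List.length_pos_of_ne_nil hne; omega⟩
  have hsums : (data.foldl (fun (p : Int × List Int) e =>
      let t := if PySem.List.pyGetD e 2 0 = 0 then p.1 - PySem.List.pyGetD e 1 0
               else if PySem.List.pyGetD e 2 0 = 1 then p.1 + PySem.List.pyGetD e 1 0 else p.1
      (t, p.2 ++ [t])) (0, [])).2
      = (List.range data.length).map (fun j => pvPref data (j + 1)) := by
    rw [pvSums_gen data 0 []]; rfl
  have hrange : PySem.List.pyRange 0 ((data.length : Int) - 1)
      = PySem.List.pyRange 0 ((k : Nat) : Int) := by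
    rw [show ((data.length : Int) - 1) = ((k : Nat) : Int) from by omega]
  simp only [find_busiest_period, find_busiest_period_alt, pvAtB_eq_pvAt, hsums]
  rw [hrange, pvA_fold data k, pvB_fold data data.length le_rfl]
  have hB := pvSel_agree data k (by omega)
  have hP : pvPref data (k + 1) =
      (if pvAt data k 2 = 0 then (pvSelA data k).2.1 - pvAt data k 1
       else if pvAt data k 2 = 1 then (pvSelA data k).2.1 + pvAt data k 1
       else (pvSelA data k).2.1) := by
    rw [pvSelA_sp data k (by omega), pvPref_succ data k (by omega)]
  rw [hk, pvSelB, hB]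
  have hone : ((k : Nat) : Int) = ((k + 1 : Nat) : Int) - 1 := by push_cast; ring
  simp only [← hone, ← hP]
  have hd : ((k : Nat) : Int) = (data.length : Int) - 1 := by omega
  split_ifs with h1 h2 h2 <;> first | rfl | (exfalso; tauto)

-- ===== VERDICT (by name: the statement is the Claim_ definition above) =====
theorem find_busiest_period_spec : Claim_equal_find_busiest_period := by
  intro data _ hpre
  unfold Spec_find_busiest_period
  exact pv_main data hpre.1
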